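-- pv_equiv track=rewrite | github.com/LautaroMelchiori/python_unsam | clase11/replicar.py | replicar
-- ===== SOURCE A (Python) =====
-- def replicar(lista, n):
--     """
--     Replica los elementos de lista, n veces
--
--     Devuelve la lista resultante de la siguiente manera:
--     replicar([1, 3, 3, 7], 2) -> ([1, 1, 3, 3, 3, 3, 7, 7])
--     """
--
--     def replicar_aux(lista, n, lista_modif, idx = 0):
--         if len(lista_modif) == len(lista) * n:
--             return lista_modif
--
--         for _ in range(n):
--             lista_modif.append(lista[idx])
--
--         return replicar_aux(lista, n, lista_modif, idx + 1)
--
--     return replicar_aux(lista, n, [])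
-- ===== SOURCE B (Python) =====
-- def replicar(lista, n):
--     """
--     Replica los elementos de lista, n veces
--
--     Devuelve la lista resultante de la siguiente manera:
--     replicar([1, 3, 3, 7], 2) -> ([1, 1, 3, 3, 3, 3, 7, 7])
--     """
--     return [x for x in lista for _ in range(n)]
-- ===== Notes on version B (the rewrite author's own statement) =====
-- stated objective: simpler
-- what changed: Replaces the accumulator recursion with a len==len*n termination test and index-based appends by a single flat comprehension over the elements.
import Mathlib
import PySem

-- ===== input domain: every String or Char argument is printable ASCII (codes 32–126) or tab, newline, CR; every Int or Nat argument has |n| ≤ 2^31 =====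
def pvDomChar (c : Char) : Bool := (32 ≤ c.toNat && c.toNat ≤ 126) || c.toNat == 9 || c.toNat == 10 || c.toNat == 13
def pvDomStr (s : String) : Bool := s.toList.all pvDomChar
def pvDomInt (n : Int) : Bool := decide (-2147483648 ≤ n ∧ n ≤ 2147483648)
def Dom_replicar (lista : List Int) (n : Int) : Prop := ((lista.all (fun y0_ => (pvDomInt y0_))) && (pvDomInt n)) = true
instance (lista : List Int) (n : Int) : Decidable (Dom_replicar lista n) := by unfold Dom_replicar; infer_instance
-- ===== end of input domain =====

-- B replaces A's accumulator recursion (termination by len == len*n, index access) with a flat comprehension; simpler, same cost.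


-- ===== PORT A =====
-- replicar_aux: fuel bounds the recursion depth; on inputs satisfying Pre_ the Python
-- recursion makes at most lista.length+1 calls, so fuel = lista.length+1 is never exhausted.
-- lista[idx] is PySem.List.pyGet?; the .getD 0 default is never reached under Pre_
-- (the n>0 run only reads idx < lista.length; for n = 0 it returns before any read).
def replicarAux (lista : List Int) (n : Int) (listaModif : List Int) (idx : Int) (fuel : Nat) : List Int :=
  match fuel with
  | 0 => listaModif
  | Nat.succ fuel =>
    if (listaModif.length : Int) = (lista.length : Int) * n then listaModif
    else
      replicarAux lista n
        (listaModif ++ List.replicate n.toNat ((PySem.List.pyGet? lista idx).getD 0))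
        (idx + 1) fuel

def replicar (lista : List Int) (n : Int) : List Int :=
  replicarAux lista n [] 0 (lista.length + 1)

-- ===== PORT B =====
-- [x for x in lista for _ in range(n)] ; range(n) has n.toNat elements
def replicar_alt (lista : List Int) (n : Int) : List Int :=
  lista.flatMap (fun x => List.replicate n.toNat x)

-- ===== PRECONDITION & SPEC =====
-- Pre_ excludes n < 0 with a nonempty list: there A never terminates (RecursionError).
def Pre_replicar (lista : List Int) (n : Int) : Prop := 0 ≤ n ∨ lista = []
instance (lista : List Int) (n : Int) : Decidable (Pre_replicar lista n) := by unfold Pre_replicar; infer_instance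
def pvWitness_replicar : List Int × Int := ([1, 3, 3, 7], 2)

def Spec_replicar (lista : List Int) (n : Int) (out : List Int) : Prop := out = replicar_alt lista n
instance (lista : List Int) (n : Int) (out : List Int) : Decidable (Spec_replicar lista n out) := by unfold Spec_replicar; infer_instance

-- ===== CLAIM (what is proved, stated in full; the proofs are below) =====
def Claim_equal_replicar : Prop := ∀ (lista : List Int) (n : Int), Dom_replicar lista n → Pre_replicar lista n → Spec_replicar lista n (replicar lista n)

-- ===== LEMMAS AND PROOFS =====

-- length of the partial accumulator: first idx elements each contribute n.toNat items
lemma flatMap_replicate_length (l : List Int) (k : Nat) :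
    (l.flatMap (fun x => List.replicate k x)).length = l.length * k := by
  induction l with
  | nil => simp
  | cons a t ih => simp [ih, Nat.succ_mul, Nat.add_comm]

lemma aux_correct (lista : List Int) (n : Int) (hn : 0 ≤ n) :
    ∀ (fuel idx : Nat), idx ≤ lista.length → lista.length - idx < fuel →
      replicarAux lista n ((lista.take idx).flatMap (fun x => List.replicate n.toNat x)) (idx : Int) fuel
        = lista.flatMap (fun x => List.replicate n.toNat x) := by
  intro fuel
  induction fuel with
  | zero => intro idx _ h; omega
  | succ fuel ih =>
    intro idx hle hfuel
    rw [replicarAux]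
    by_cases hc : ((((lista.take idx).flatMap (fun x => List.replicate n.toNat x)).length : Int)
        = (lista.length : Int) * n)
    · rw [if_pos hc]
      rw [flatMap_replicate_length] at hc
      have htk : (lista.take idx).length = idx := by
        simp [List.length_take]; omega
      rw [htk] at hc
      -- idx * n.toNat = lista.length * n (as ints, n ≥ 0) : either n = 0 or idx = length
      have hn' : (n.toNat : Int) = n := Int.toNat_of_nonneg hn
      by_cases h0 : n.toNat = 0
      · simp [h0, List.flatMap]
      · have : idx = lista.length := by
          have hc' : (↑(idx * n.toNat) : Int) = ↑lista.length * ↑n.toNat := by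
            rw [hn']; exact hc
          have : (idx : Int) * (n.toNat : Int) = (lista.length : Int) * (n.toNat : Int) := by
            exact_mod_cast hc'
          have := mul_right_cancel₀ (by exact_mod_cast h0 : ((n.toNat : Int)) ≠ 0) this
          exact_mod_cast this
        rw [this, List.take_length]
    · rw [if_neg hc]
      -- the false branch: n > 0 and idx < lista.length (else the test would be true)
      have htk : (lista.take idx).length = idx := by
        simp [List.length_take]; omega
      have hn' : (n.toNat : Int) = n := Int.toNat_of_nonneg hn
      have hlt : idx < lista.length := by
        rcases Nat.lt_or_ge idx lista.length with h | h
        · exact h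
        · exfalso; apply hc
          rw [flatMap_replicate_length, htk]
          have : idx = lista.length := by omega
          rw [this, Nat.cast_mul, hn']
      have hget : PySem.List.pyGet? lista (idx : Int) = some lista[idx] := by
        simp [PySem.List.pyGet?, PySem.List.pyIdx?, hlt]
      have hstep : (lista.take idx).flatMap (fun x => List.replicate n.toNat x)
            ++ List.replicate n.toNat ((PySem.List.pyGet? lista (idx : Int)).getD 0)
          = (lista.take (idx + 1)).flatMap (fun x => List.replicate n.toNat x) := by
        rw [hget, List.take_add_one, List.flatMap_append]
        simp [List.getElem?_eq_getElem hlt]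
      rw [hstep]
      have : ((idx : Int) + 1) = ((idx + 1 : Nat) : Int) := by push_cast; ring
      rw [this]
      exact ih (idx + 1) (by omega) (by omega)

-- ===== VERDICT (by name: the statement is the Claim_ definition above) =====
theorem replicar_spec : Claim_equal_replicar := by
  intro lista n _ hpre
  unfold Spec_replicar replicar replicar_alt
  rcases hpre with hn | hnil
  · have := aux_correct lista n hn (lista.length + 1) 0 (by omega) (by omega)
    simpa using this
  · subst hnil
    simp [replicarAux]
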